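-- pv_equiv track=rewrite | github.com/LeaneTEXIER/Master_1 | S1/ACT/TP3/voyageur_commerce.py | verification_certificat
-- ===== SOURCE A (Python) =====
-- def verification_certificat(c, n, D, l):
--     #Verification que chaque ville y est une et une seule fois
--     verif = [False for i in range (n)]
--     for i in c:
--         if(i<0 or i>=n or verif[i]):
--
--             return False
--         verif[i] = True
--     for i in verif:
--         if not(i):
--             return False
--     #Verification de la distance
--     distance = 0
--     for i in range (0, n-1):
--         #distance entre chaque ville
--         distance += D[c[i]][c[i+1]]
--     #distance afin de revenir à la première ville
--     distance += D[c[n-1]][c[0]]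
--     return distance <= l
-- ===== SOURCE B (Python) =====
-- def verification_certificat(c, n, D, l):
--     # permutation test by sort-and-compare instead of a marking table
--     if sorted(c) != list(range(n)):
--         return False
--     # one pass over the cyclically-rotated pairs instead of an index loop + wrap edge
--     total = 0
--     for a, b in zip(c, c[1:] + c[:1]):
--         total += D[a][b]
--     return total <= l
-- ===== Notes on version B (the rewrite author's own statement) =====
-- stated objective: alternative
-- what changed: A's boolean marking table with its duplicate/range short-circuit loop and completeness scan becomes a sort-and-compare permutation test (sorted(c) == list(range(n))), and A's index loop over range(n-1) plus a separate wrap edge becomes a single fold over the cyclically-rotated pair list zip(c, c[1:]+c[:1]).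
import Mathlib
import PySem

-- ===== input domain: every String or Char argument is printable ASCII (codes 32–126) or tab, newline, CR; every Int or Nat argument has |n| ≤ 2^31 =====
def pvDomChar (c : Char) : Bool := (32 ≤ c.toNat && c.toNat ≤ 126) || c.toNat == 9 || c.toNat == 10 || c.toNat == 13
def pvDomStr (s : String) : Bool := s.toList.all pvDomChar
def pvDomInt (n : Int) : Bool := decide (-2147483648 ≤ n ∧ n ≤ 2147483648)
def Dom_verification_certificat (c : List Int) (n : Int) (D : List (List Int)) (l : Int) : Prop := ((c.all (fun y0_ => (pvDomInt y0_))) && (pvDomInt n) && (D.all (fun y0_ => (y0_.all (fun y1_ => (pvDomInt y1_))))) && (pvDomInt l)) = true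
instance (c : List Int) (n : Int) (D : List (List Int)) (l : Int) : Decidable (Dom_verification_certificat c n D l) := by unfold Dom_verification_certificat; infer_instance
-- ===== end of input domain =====

-- B replaces A's boolean marking table by a sort-and-compare permutation test and A's
-- index loop + wrap edge by one fold over the rotated pair list zip(c, c[1:]+c[:1]) (objective: alternative).


-- ===== PORT A =====
-- the marking loop: 'for i in c: if i<0 or i>=n or verif[i]: return False; verif[i] = True'
def vcMark (n : Int) : List Int → List Bool → Option (List Bool)
  | [], verif => some verif
  | i :: rest, verif =>
      if i < 0 ∨ n ≤ i ∨ ((PySem.List.pyGet? verif i).getD false) = true then none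
      else vcMark n rest (verif.set i.toNat true)

-- A's distance phase: 'distance = Σ_{i∈range(n-1)} D[c[i]][c[i+1]]; distance += D[c[n-1]][c[0]]'
-- the .getD defaults are only reached where Python raises IndexError; Pre_ excludes exactly those inputs
def vcDistance (c : List Int) (n : Int) (D : List (List Int)) : Int :=
  ((PySem.List.pyRange 0 (n - 1) 1).foldl (fun acc i =>
      acc + (PySem.List.pyGet? ((PySem.List.pyGet? D ((PySem.List.pyGet? c i).getD 0)).getD [])
               ((PySem.List.pyGet? c (i + 1)).getD 0)).getD 0) 0)
  + (PySem.List.pyGet? ((PySem.List.pyGet? D ((PySem.List.pyGet? c (n - 1)).getD 0)).getD [])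
       ((PySem.List.pyGet? c 0).getD 0)).getD 0

def verification_certificat (c : List Int) (n : Int) (D : List (List Int)) (l : Int) : Bool :=
  -- verif = [False for i in range(n)]
  match vcMark n c (List.replicate n.toNat false) with
  | none => false
  | some v =>
      if v.any (fun b => !b) then false         -- 'for i in verif: if not i: return False'
      else decide (vcDistance c n D ≤ l)

-- ===== PORT B =====
def verification_certificat_alt (c : List Int) (n : Int) (D : List (List Int)) (l : Int) : Bool :=
  if PySem.List.sorted c (fun x => x) false ≠ PySem.List.pyRange 0 n 1 then false
  else
    -- 'for a, b in zip(c, c[1:] + c[:1]): total += D[a][b]'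
    decide ((c.zip (PySem.List.slice c (some 1) none ++ PySem.List.slice c none (some 1))).foldl
      (fun total p =>
        total + (PySem.List.pyGet? ((PySem.List.pyGet? D p.1).getD []) p.2).getD 0) 0 ≤ l)

-- ===== PRECONDITION & SPEC =====
-- Pre_ excludes exactly the inputs on which the Python A raises IndexError: those where the
-- permutation test passes but either n < 1 (so c[n-1] is taken on the empty list) or some
-- accessed entry D[c[i]][c[i+1]] / D[c[n-1]][c[0]] is out of range.
def Pre_verification_certificat (c : List Int) (n : Int) (D : List (List Int)) (l : Int) : Prop :=
  (c.length = n.toNat ∧ c.Perm (PySem.List.pyRange 0 n 1)) →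
    (1 ≤ n ∧ ∀ p ∈ c.zip (c.drop 1 ++ c.take 1),
        p.1.toNat < D.length ∧ p.2.toNat < (D.getD p.1.toNat []).length)
instance (c : List Int) (n : Int) (D : List (List Int)) (l : Int) : Decidable (Pre_verification_certificat c n D l) := by unfold Pre_verification_certificat; infer_instance

def pvWitness_verification_certificat : List Int × Int × List (List Int) × Int :=
  ([0, 1], 2, [[0, 5], [7, 0]], 100)

def Spec_verification_certificat (c : List Int) (n : Int) (D : List (List Int)) (l : Int) (out : Bool) : Prop := out = verification_certificat_alt c n D l
instance (c : List Int) (n : Int) (D : List (List Int)) (l : Int) (out : Bool) : Decidable (Spec_verification_certificat c n D l out) := by unfold Spec_verification_certificat; infer_instance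

-- ===== CLAIM (what is proved, stated in full; the proofs are below) =====
def Claim_equal_verification_certificat : Prop := ∀ (c : List Int) (n : Int) (D : List (List Int)) (l : Int), Dom_verification_certificat c n D l → Pre_verification_certificat c n D l → Spec_verification_certificat c n D l (verification_certificat c n D l)

-- ===== LEMMAS AND PROOFS =====

theorem vcMark_length (n : Int) : ∀ (c : List Int) (verif v : List Bool),
    vcMark n c verif = some v → v.length = verif.length := by
  intro c
  induction c with
  | nil => intro verif v h; simp [vcMark] at h; simp [h]
  | cons i rest ih =>
      intro verif v h
      simp only [vcMark] at h
      split at h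
      · exact absurd h (by simp)
      · have := ih _ _ h
        simpa using this

theorem set_getD_true (verif : List Bool) (i j : Nat) (hi : i < verif.length) :
    (verif.set i true).getD j false = if i = j then true else verif.getD j false := by
  rcases Nat.lt_or_ge j verif.length with h | h
  · rw [List.getD_eq_getElem _ _ (by simpa using h), List.getElem_set,
        List.getD_eq_getElem _ _ h]
  · rw [List.getD_eq_default _ _ (by simpa using h), List.getD_eq_default _ _ h,
        if_neg (by omega)]

theorem pyGetD_false_eq (verif : List Bool) (i : Int) (h0 : 0 ≤ i) (h1 : i.toNat < verif.length) :
    (PySem.List.pyGet? verif i).getD false = verif.getD i.toNat false := by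
  rw [PySem.List.pyGet?_eq_some_getElem verif h0 (by omega), List.getD_eq_getElem _ _ h1]
  rfl

theorem vcMark_some_iff (n : Int) : ∀ (c : List Int) (verif : List Bool),
    verif.length = n.toNat →
    ((vcMark n c verif).isSome ↔
      (c.Nodup ∧ ∀ i ∈ c, 0 ≤ i ∧ i < n ∧ verif.getD i.toNat false = false)) := by
  intro c
  induction c with
  | nil => intro verif hlen; simp [vcMark]
  | cons i rest ih =>
      intro verif hlen
      simp only [vcMark]
      by_cases hbad : i < 0 ∨ n ≤ i ∨ ((PySem.List.pyGet? verif i).getD false) = true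
      · rw [if_pos hbad]
        simp only [Option.isSome_none, Bool.false_eq_true, false_iff]
        rintro ⟨_, hall⟩
        obtain ⟨h0, h1, h2⟩ := hall i (by simp)
        have hrange : i.toNat < verif.length := by omega
        rcases hbad with h | h | h
        · omega
        · omega
        · rw [pyGetD_false_eq verif i h0 hrange, h2] at h
          exact absurd h (by simp)
      · push_neg at hbad
        obtain ⟨h0, h1, h2⟩ := hbad
        have h0' : 0 ≤ i := by omega
        have h1' : i < n := by omega
        have hrange : i.toNat < verif.length := by omega
        have hvi : verif.getD i.toNat false = false := by
          rw [← pyGetD_false_eq verif i h0' hrange]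
          simpa using h2
        rw [if_neg (by push_neg; exact ⟨h0', h1', h2⟩)]
        rw [ih (verif.set i.toNat true) (by simpa using hlen)]
        constructor
        · rintro ⟨hnd, hall⟩
          refine ⟨List.nodup_cons.mpr ⟨?_, hnd⟩, ?_⟩
          · intro hmem
            obtain ⟨_, _, hset⟩ := hall i hmem
            rw [set_getD_true verif _ _ hrange, if_pos rfl] at hset
            exact absurd hset (by simp)
          · intro j hj
            rcases List.mem_cons.mp hj with hj | hj
            · subst hj; exact ⟨h0', h1', hvi⟩
            · obtain ⟨j0, j1, hset⟩ := hall j hj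
              refine ⟨j0, j1, ?_⟩
              rw [set_getD_true verif _ _ hrange] at hset
              split at hset
              · exact absurd hset (by simp)
              · exact hset
        · rintro ⟨hnd, hall⟩
          obtain ⟨hni, hnd'⟩ := List.nodup_cons.mp hnd
          refine ⟨hnd', ?_⟩
          intro j hj
          obtain ⟨j0, j1, hget'⟩ := hall j (List.mem_cons_of_mem _ hj)
          refine ⟨j0, j1, ?_⟩
          rw [set_getD_true verif _ _ hrange]
          have hne : i ≠ j := fun h => hni (h ▸ hj)
          rw [if_neg (by omega)]
          exact hget'

theorem vcMark_getD (n : Int) : ∀ (c : List Int) (verif v : List Bool),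
    verif.length = n.toNat → vcMark n c verif = some v → ∀ j : Nat,
    v.getD j false = (verif.getD j false || decide ((j : Int) ∈ c)) := by
  intro c
  induction c with
  | nil => intro verif v _ h j; simp [vcMark] at h; simp [h]
  | cons i rest ih =>
      intro verif v hlen h j
      simp only [vcMark] at h
      split at h
      · exact absurd h (by simp)
      · rename_i hgood
        push_neg at hgood
        obtain ⟨h0, h1, _⟩ := hgood
        rw [ih _ _ (by simpa using hlen) h j]
        rw [set_getD_true verif _ _ (by omega)]
        by_cases hij : (j : Int) = i
        · have : i.toNat = j := by omega
          simp [this, hij]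
        · have : i.toNat ≠ j := by omega
          simp [this, hij]

-- A's two checks pass iff c is a permutation of range(n)
theorem perm_iff_marks (c : List Int) (n : Int) :
    c.Perm (PySem.List.pyRange 0 n 1) ↔
    (c.Nodup ∧ (∀ i ∈ c, 0 ≤ i ∧ i < n) ∧ ∀ j : Nat, j < n.toNat → (j : Int) ∈ c) := by
  constructor
  · intro hp
    refine ⟨hp.nodup_iff.mpr (PySem.List.nodup_pyRange_one 0 n), ?_, ?_⟩
    · intro i hi
      have := hp.mem_iff.mp hi
      rw [PySem.List.mem_pyRange_one] at this
      omega
    · intro j hj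
      apply hp.mem_iff.mpr
      rw [PySem.List.mem_pyRange_one]
      omega
  · rintro ⟨hnd, hbnd, hcmp⟩
    apply List.Subperm.antisymm
    · apply hnd.subperm
      intro i hi
      rw [PySem.List.mem_pyRange_one]
      exact ⟨(hbnd i hi).1, (hbnd i hi).2⟩
    · apply (PySem.List.nodup_pyRange_one 0 n).subperm
      intro x hx
      rw [PySem.List.mem_pyRange_one] at hx
      have : x = ((x.toNat : Nat) : Int) := by omega
      rw [this]
      exact hcmp x.toNat (by omega)

theorem sorted_eq_iff_perm (c : List Int) (n : Int) :
    PySem.List.sorted c (fun x => x) false = PySem.List.pyRange 0 n 1 ↔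
    c.Perm (PySem.List.pyRange 0 n 1) := by
  constructor
  · intro h
    have hs : (PySem.List.sorted c (fun x => x) false).Perm c := PySem.List.sorted_perm c _ _
    rw [h] at hs
    exact hs.symm
  · intro hp
    exact PySem.List.sorted_eq_of_perm_of_pairwise_lt c (PySem.List.pyRange 0 n 1) (fun x => x)
      hp.symm (by simpa using PySem.List.pairwise_lt_pyRange_one 0 n)

theorem replicate_getD_false (k j : Nat) : (List.replicate k false).getD j false = false := by
  rcases Nat.lt_or_ge j k with h | h
  · rw [List.getD_eq_getElem _ _ (by simpa using h)]; simp
  · rw [List.getD_eq_default _ _ (by simpa using h)]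

-- the rotated pair list is the index-pairs list plus the wrap pair
theorem zip_rot_eq (c : List Int) (h : c ≠ []) :
    c.zip (c.drop 1 ++ c.take 1)
      = (List.range (c.length - 1)).map (fun i => (c.getD i 0, c.getD (i + 1) 0))
        ++ [(c.getD (c.length - 1) 0, c.getD 0 0)] := by
  have hlen : 1 ≤ c.length := List.length_pos_iff.mpr h
  apply List.ext_getElem
  · simp; omega
  · intro i h1 h2
    have hi : i < c.length := by simp at h1; omega
    rcases Nat.lt_or_ge i (c.length - 1) with hlt | hge
    · have hR : ((List.range (c.length - 1)).map (fun i => (c.getD i 0, c.getD (i + 1) 0))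
            ++ [(c.getD (c.length - 1) 0, c.getD 0 0)])[i]'h2
          = (c.getD i 0, c.getD (i + 1) 0) := by
        rw [List.getElem_append_left (by simpa using hlt), List.getElem_map, List.getElem_range]
      rw [hR, List.getElem_zip, List.getElem_append_left (by simp; omega), List.getElem_drop,
          List.getD_eq_getElem _ _ hi, List.getD_eq_getElem _ _ (show i + 1 < c.length by omega)]
      simp [Nat.add_comm]
    · have hieq : i = c.length - 1 := by omega
      subst hieq
      have hR : ((List.range (c.length - 1)).map (fun i => (c.getD i 0, c.getD (i + 1) 0))
            ++ [(c.getD (c.length - 1) 0, c.getD 0 0)])[c.length - 1]'h2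
          = (c.getD (c.length - 1) 0, c.getD 0 0) := by
        rw [List.getElem_append_right (by simp)]
        simp
      rw [hR, List.getElem_zip, List.getElem_append_right (by simp)]
      have hidx : c.length - 1 - (c.drop 1).length = 0 := by simp
      rw [List.getD_eq_getElem _ _ (show c.length - 1 < c.length by omega),
          List.getD_eq_getElem _ _ (show 0 < c.length by omega)]
      congr 1
      · simp [List.getElem_take]

-- A's index-loop distance equals B's fold over the rotated pairs
theorem distance_eq (c : List Int) (n : Int) (D : List (List Int))
    (hn : 1 ≤ n) (hlen : c.length = n.toNat) :
    vcDistance c n D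
      = (c.zip (PySem.List.slice c (some 1) none ++ PySem.List.slice c none (some 1))).foldl
          (fun total p =>
            total + (PySem.List.pyGet? ((PySem.List.pyGet? D p.1).getD []) p.2).getD 0) 0 := by
  have hne : c ≠ [] := by
    intro h; subst h; simp at hlen; omega
  rw [PySem.List.slice_from_one, PySem.List.slice_to c (by omega : (0:Int) ≤ 1)]
  have ht : c.tail = c.drop 1 := by simp
  have h1 : (1:Int).toNat = 1 := rfl
  rw [ht, h1, zip_rot_eq c hne, List.foldl_append]
  simp only [List.foldl_cons, List.foldl_nil]
  unfold vcDistance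
  congr 1
  · -- the range(n-1) loop
    rw [PySem.List.pyRange_one, List.foldl_map, List.foldl_map]
    have hm : (n - 1 - 0).toNat = c.length - 1 := by omega
    rw [hm]
    apply PySem.List.foldl_congr_mem
    intro acc k hk
    have hk1 : (0:Int) + (k:Int) = ((k:Nat):Int) := by push_cast; ring
    have hk2 : (k:Int) + 1 = (((k+1:Nat)):Int) := by push_cast; ring
    simp only [hk1, hk2, PySem.List.pyGet?_natCast, ← List.getD_eq_getElem?_getD]
  · -- the wrap edge 'D[c[n-1]][c[0]]'
    have hw : n - 1 = ((c.length - 1 : Nat) : Int) := by omega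
    rw [hw]
    simp only [PySem.List.pyGet?_natCast, PySem.List.pyGet?_zero, ← List.getD_eq_getElem?_getD]

theorem verification_certificat_eq (c : List Int) (n : Int) (D : List (List Int)) (l : Int)
    (hpre : Pre_verification_certificat c n D l) :
    verification_certificat c n D l = verification_certificat_alt c n D l := by
  unfold verification_certificat verification_certificat_alt
  by_cases hperm : c.Perm (PySem.List.pyRange 0 n 1)
  · rw [if_neg (by simp [(sorted_eq_iff_perm c n).mpr hperm])]
    obtain ⟨hnd, hbnd, hcmp⟩ := (perm_iff_marks c n).mp hperm
    have hlen : (List.replicate n.toNat false).length = n.toNat := by simp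
    have hsome : (vcMark n c (List.replicate n.toNat false)).isSome := by
      rw [vcMark_some_iff n c _ hlen]
      exact ⟨hnd, fun i hi => ⟨(hbnd i hi).1, (hbnd i hi).2, replicate_getD_false _ _⟩⟩
    obtain ⟨v, hv⟩ := Option.isSome_iff_exists.mp hsome
    rw [hv]
    have hall : v.any (fun b => !b) = false := by
      rw [List.any_eq_false]
      intro b hb
      obtain ⟨j, hj, hjb⟩ := List.mem_iff_getElem.mp hb
      have hvlen : v.length = n.toNat := by rw [vcMark_length n c _ _ hv]; exact hlen
      have h1 : v.getD j false = b := by rw [List.getD_eq_getElem _ _ hj]; exact hjb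
      rw [vcMark_getD n c _ _ hlen hv j, replicate_getD_false, Bool.false_or] at h1
      have : (j : Int) ∈ c := hcmp j (by omega)
      simp [this] at h1
      simp [← h1]
    have hclen : c.length = n.toNat := by
      have := hperm.length_eq
      simpa [PySem.List.length_pyRange_one] using this
    obtain ⟨hn1, _⟩ := hpre ⟨hclen, hperm⟩
    rw [distance_eq c n D hn1 hclen]
    simp [hall]
  · rw [if_pos (fun h => hperm ((sorted_eq_iff_perm c n).mp h))]
    rcases hv : vcMark n c (List.replicate n.toNat false) with _ | v
    · rfl
    · have hlen : (List.replicate n.toNat false).length = n.toNat := by simp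
      have hsome := (vcMark_some_iff n c _ hlen).mp (by rw [hv]; rfl)
      obtain ⟨hnd, hall⟩ := hsome
      have hmiss : ∃ j : Nat, j < n.toNat ∧ (j : Int) ∉ c := by
        by_contra hno
        push_neg at hno
        exact hperm ((perm_iff_marks c n).mpr
          ⟨hnd, fun i hi => ⟨(hall i hi).1, (hall i hi).2.1⟩, hno⟩)
      obtain ⟨j, hjn, hjc⟩ := hmiss
      have hvlen : v.length = n.toNat := by rw [vcMark_length n c _ _ hv]; exact hlen
      have hvj : v.getD j false = false := by
        rw [vcMark_getD n c _ _ hlen hv j, replicate_getD_false, Bool.false_or]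
        simp [hjc]
      have hjr : j < v.length := by omega
      have hany : v.any (fun b => !b) = true := by
        rw [List.any_eq_true]
        refine ⟨v[j], List.getElem_mem hjr, ?_⟩
        rw [List.getD_eq_getElem _ _ hjr] at hvj
        simp [hvj]
      simp [hany]

-- ===== VERDICT (by name: the statement is the Claim_ definition above) =====
theorem verification_certificat_spec : Claim_equal_verification_certificat := by
  intro c n D l _ hpre
  unfold Spec_verification_certificat
  exact verification_certificat_eq c n D l hpre
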